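-- pv_equiv track=rewrite | github.com/huiseung/Progamming-Digest | CodingTest/프로그래머스/lv2_더 맵게.py | solution
-- ===== SOURCE A (Python) =====
-- import heapq
--
-- def solution(scoville, K):
--     answer = 0
--     q = []
--     for e in scoville:
--         heapq.heappush(q, e)
--     while q[0] < K and len(q) > 1:
--         num1 = heapq.heappop(q)
--         num2 = heapq.heappop(q)
--         heapq.heappush(q, num1+num2*2)
--         answer += 1
--     if q[0] < K:
--         return -1
--     return answer
-- ===== SOURCE B (Python) =====
-- def solution(scoville, K):
--     # Two-queue technique: the mixes are produced in nondecreasing order, so a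
--     # FIFO list of mixes merged with the once-sorted originals replaces the heap.
--     orig = sorted(scoville)
--     mix = []
--     i = j = 0  # front pointers into orig and mix
--     answer = 0
--     while True:
--         if i < len(orig) and (j == len(mix) or orig[i] <= mix[j]):
--             fv = orig[i]
--         else:
--             fv = mix[j]
--         if fv >= K or (len(orig) - i) + (len(mix) - j) <= 1:
--             return -1 if fv < K else answer
--         if i < len(orig) and (j == len(mix) or orig[i] <= mix[j]):
--             a, i = orig[i], i + 1
--         else:
--             a, j = mix[j], j + 1
--         if i < len(orig) and (j == len(mix) or orig[i] <= mix[j]):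
--             b, i = orig[i], i + 1
--         else:
--             b, j = mix[j], j + 1
--         mix.append(a + 2 * b)
--         answer += 1
-- ===== Notes on version B (the rewrite author's own statement) =====
-- stated objective: faster
-- what changed: Replaces the heap entirely by the two-queue technique: sort the input once, keep a FIFO list of mix results (provably produced in merge-compatible order), and merge the two queues with advancing front pointers - no heap operations and no reinsertion into the middle of a container.
import Mathlib
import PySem

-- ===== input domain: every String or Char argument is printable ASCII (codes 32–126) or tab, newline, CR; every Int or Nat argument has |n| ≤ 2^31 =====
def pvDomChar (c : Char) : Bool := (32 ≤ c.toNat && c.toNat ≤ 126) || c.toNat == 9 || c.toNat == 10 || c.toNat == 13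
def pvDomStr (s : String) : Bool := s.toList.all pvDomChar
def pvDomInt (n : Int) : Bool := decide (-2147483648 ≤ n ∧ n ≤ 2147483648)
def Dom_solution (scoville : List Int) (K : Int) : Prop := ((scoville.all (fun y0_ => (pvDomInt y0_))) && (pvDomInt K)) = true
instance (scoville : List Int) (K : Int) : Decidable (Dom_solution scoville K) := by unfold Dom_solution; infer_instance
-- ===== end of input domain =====

-- B replaces the heap by the two-queue technique: sort once, then merge the sorted originals
-- with a FIFO queue of mix results, advancing front pointers; no heap and no reinsertion.
-- A raises IndexError on an empty scoville list (q[0]); such inputs are excluded by Pre_ (B raises there too).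

-- ===== PORT A =====
-- heapq.heappop: removes and returns the heap minimum.  Modelled on the value level:
-- popMinA q = some (m, rest) where m is the minimum value of q and rest the remaining multiset.
def popMinA : List Int → Option (Int × List Int)
  | [] => none
  | [x] => some (x, [])
  | x :: y :: t =>
    match popMinA (y :: t) with
    | some (m, rest) => if x ≤ m then some (x, y :: t) else some (m, x :: rest)
    | none => none

theorem popMinA_length : ∀ (q : List Int) (m : Int) (r : List Int),
    popMinA q = some (m, r) → r.length + 1 = q.length := by
  intro q
  induction q with
  | nil => intro m r h; simp [popMinA] at h
  | cons x t ih =>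
    intro m r h
    match t with
    | [] => simp [popMinA] at h; simp [h.2]
    | y :: t' =>
      simp only [popMinA] at h
      cases hp : popMinA (y :: t') with
      | none => rw [hp] at h; simp at h
      | some p =>
        rw [hp] at h
        have hl := ih p.1 p.2 (by rw [hp])
        by_cases hx : x ≤ p.1
        · simp [hx] at h; simp [← h.2]
        · simp [hx] at h
          rw [← h.2]
          simp at hl ⊢
          omega

-- the while loop of A: peek the min (heap root q[0]); if root < K and len > 1, pop two, push num1+num2*2
def loopA (q : List Int) (K : Int) (answer : Int) : Int :=
  match h1 : popMinA q with
  | none => -1          -- empty heap: q[0] would raise; unreachable under Pre_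
  | some (num1, q1) =>
    if num1 < K ∧ q.length > 1 then
      match h2 : popMinA q1 with
      | none => -1      -- unreachable: q1 nonempty when q.length > 1
      | some (num2, q2) => loopA (q2 ++ [num1 + num2 * 2]) K (answer + 1)
    else if num1 < K then -1 else answer
termination_by q.length
decreasing_by
  have l1 := popMinA_length q num1 q1 h1
  have l2 := popMinA_length q1 num2 q2 h2
  simp; omega

def solution (scoville : List Int) (K : Int) : Int :=
  let q := scoville.foldl (fun q e => q ++ [e]) []   -- the heappush loop (value level: the multiset of pushes)
  loopA q K 0

-- ===== PORT B =====
-- Source B keeps two front-pointered queues: the sorted originals and a FIFO of mixes.  The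
-- suffixes right of the two front pointers are represented as lists (advance pointer = tail).
-- Source B's condition 'i < len(orig) and (j == len(mix) or orig[i] <= mix[j])': take from orig?
def takeO : List Int → List Int → Bool
  | _ :: _, [] => true
  | x :: _, y :: _ => x ≤ y
  | [], _ => false

-- Source B's pop block (it appears twice in the Python loop body): value, new orig-suffix, new mix-suffix
def pyPop (o m : List Int) : Int × List Int × List Int :=
  if takeO o m then (o.headD 0, o.tail, m) else (m.headD 0, o, m.tail)

theorem pyPop_len (o m : List Int) (h : 1 ≤ o.length + m.length) :
    (pyPop o m).2.1.length + (pyPop o m).2.2.length + 1 = o.length + m.length := by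
  rcases o with _ | ⟨x, o'⟩ <;> rcases m with _ | ⟨y, m'⟩ <;>
    simp [pyPop, takeO] at h ⊢
  split_ifs <;> simp <;> omega

-- the main while-loop of Source B
def loopB (o m : List Int) (K ans : Int) : Int :=
  let fv := if takeO o m then o.headD 0 else m.headD 0   -- mix[j] on empty raises; unreachable under Pre_
  if fv < K ∧ o.length + m.length > 1 then
    let p1 := pyPop o m
    let p2 := pyPop p1.2.1 p1.2.2
    loopB p2.2.1 (p2.2.2 ++ [p1.1 + 2 * p2.1]) K (ans + 1)
  else if fv < K then -1 else ans
termination_by o.length + m.length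
decreasing_by
  have l1 := pyPop_len o m (by omega)
  have l2 := pyPop_len (pyPop o m).2.1 (pyPop o m).2.2 (by omega)
  simp only [List.length_append, List.length_cons, List.length_nil]
  omega

def solution_alt (scoville : List Int) (K : Int) : Int :=
  loopB (PySem.List.sorted scoville (fun x => x) false) [] K 0

-- ===== PRECONDITION & SPEC =====
-- Pre_ excludes only the empty list, on which A raises IndexError at q[0] (B raises there too).
def Pre_solution (scoville : List Int) (K : Int) : Prop := scoville ≠ []
instance (scoville : List Int) (K : Int) : Decidable (Pre_solution scoville K) := by unfold Pre_solution; infer_instance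
def pvWitness_solution : List Int × Int := ([1, 2, 3, 9, 10, 12], 7)
def Spec_solution (scoville : List Int) (K : Int) (out : Int) : Prop := out = solution_alt scoville K
instance (scoville : List Int) (K : Int) (out : Int) : Decidable (Spec_solution scoville K out) := by unfold Spec_solution; infer_instance

-- ===== CLAIM (what is proved, stated in full; the proofs are below) =====
def Claim_equal_solution : Prop := ∀ (scoville : List Int) (K : Int), Dom_solution scoville K → Pre_solution scoville K → Spec_solution scoville K (solution scoville K)

-- ===== LEMMAS AND PROOFS =====

theorem popMinA_perm : ∀ (q : List Int) (m : Int) (r : List Int),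
    popMinA q = some (m, r) → q.Perm (m :: r) := by
  intro q
  induction q with
  | nil => intro m r h; simp [popMinA] at h
  | cons x t ih =>
    intro m r h
    match t with
    | [] => simp [popMinA] at h; simp [h.1, h.2]
    | y :: t' =>
      simp only [popMinA] at h
      cases hp : popMinA (y :: t') with
      | none => rw [hp] at h; simp at h
      | some p =>
        rw [hp] at h
        have hperm := ih p.1 p.2 (by rw [hp])
        by_cases hx : x ≤ p.1
        · simp [hx] at h
          rw [← h.1, ← h.2]
        · simp [hx] at h
          rw [← h.1, ← h.2]
          exact (hperm.cons x).trans (List.Perm.swap p.1 x p.2)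

theorem popMinA_min : ∀ (q : List Int) (m : Int) (r : List Int),
    popMinA q = some (m, r) → ∀ y ∈ q, m ≤ y := by
  intro q
  induction q with
  | nil => intro m r h; simp [popMinA] at h
  | cons x t ih =>
    intro m r h
    match t with
    | [] => simp [popMinA] at h; simp [← h.1]
    | y :: t' =>
      simp only [popMinA] at h
      cases hp : popMinA (y :: t') with
      | none => rw [hp] at h; simp at h
      | some p =>
        rw [hp] at h
        have hmin := ih p.1 p.2 (by rw [hp])
        by_cases hx : x ≤ p.1
        · simp [hx] at h
          intro z hz
          rcases List.mem_cons.mp hz with hz | hz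
          · omega
          · have := hmin z hz; omega
        · simp [hx] at h
          intro z hz
          rcases List.mem_cons.mp hz with hz | hz
          · omega
          · have := hmin z hz; omega

theorem popMinA_none : ∀ (q : List Int), popMinA q = none → q = [] := by
  intro q h
  match q with
  | [] => rfl
  | [x] => simp [popMinA] at h
  | x :: y :: t =>
    simp only [popMinA] at h
    cases hp : popMinA (y :: t) with
    | none => exact absurd (popMinA_none (y :: t) hp) (by simp)
    | some p => rw [hp] at h; by_cases hx : x ≤ p.1 <;> simp [hx] at h

-- reference insertion used only by the proofs: insort s l puts s after every element ≤ s
def insortB (s : Int) : List Int → List Int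
  | [] => [s]
  | x :: xs => if x ≤ s then x :: insortB s xs else s :: x :: xs

theorem insortB_length (s : Int) : ∀ (l : List Int), (insortB s l).length = l.length + 1 := by
  intro l
  induction l with
  | nil => simp [insortB]
  | cons x xs ih => by_cases h : x ≤ s <;> simp [insortB, h, ih]

theorem insortB_perm (s : Int) : ∀ (l : List Int), (insortB s l).Perm (s :: l) := by
  intro l
  induction l with
  | nil => simp [insortB]
  | cons x xs ih =>
    by_cases h : x ≤ s
    · simp only [insortB, if_pos h]
      exact (ih.cons x).trans (List.Perm.swap s x xs)
    · simp [insortB, h]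

theorem insortB_sorted (s : Int) : ∀ (l : List Int), l.Pairwise (· ≤ ·) → (insortB s l).Pairwise (· ≤ ·) := by
  intro l
  induction l with
  | nil => intro _; simp [insortB]
  | cons x xs ih =>
    intro hp
    rw [List.pairwise_cons] at hp
    by_cases h : x ≤ s
    · simp only [insortB, if_pos h]
      rw [List.pairwise_cons]
      constructor
      · intro z hz
        rcases List.mem_cons.mp ((insortB_perm s xs).mem_iff.mp hz) with hz | hz
        · omega
        · exact hp.1 z hz
      · exact ih hp.2
    · simp only [insortB, if_neg h]
      rw [List.pairwise_cons]
      constructor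
      · intro z hz
        rcases List.mem_cons.mp hz with hz | hz
        · omega
        · have := hp.1 z hz; omega
      · rw [List.pairwise_cons]; exact hp

-- reference loop on a sorted list: pop the two heads, reinsert; both ports are reduced to it
def refLoop (q : List Int) (K ans : Int) : Int :=
  match q with
  | [] => -1
  | [x] => if x < K then -1 else ans
  | a :: b :: rest => if a < K then refLoop (insortB (a + 2 * b) rest) K (ans + 1) else ans
termination_by q.length
decreasing_by simp [insortB_length]

-- A's loop equals the reference loop on any sorted permutation of the pot
theorem loopA_ref : ∀ (n : ℕ) (q q' : List Int) (K ans : Int), q.length = n → q.Perm q' →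
    q'.Pairwise (· ≤ ·) → loopA q K ans = refLoop q' K ans := by
  intro n
  induction n using Nat.strong_induction_on with
  | _ n ih =>
    intro q q' K ans hlen hperm hsort
    match q' with
    | [] =>
      have hq : q = [] := hperm.eq_nil
      subst hq
      simp [loopA, popMinA, refLoop]
    | [a] =>
      have hq : q = [a] := List.perm_singleton.mp hperm
      subst hq
      unfold loopA
      simp [popMinA, refLoop]
    | a :: b :: rest =>
      have hab : a ≤ b ∧ ∀ z ∈ b :: rest, a ≤ z := by
        rw [List.pairwise_cons] at hsort
        exact ⟨hsort.1 b (by simp), hsort.1⟩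
      have hsort' : (b :: rest).Pairwise (· ≤ ·) := (List.pairwise_cons.mp hsort).2
      cases hm : popMinA q with
      | none => exact absurd (popMinA_none q hm) (by
          intro hq; subst hq; exact absurd hperm.symm (by simp))
      | some p =>
        obtain ⟨m, r⟩ := p
        have hqr : q.Perm (m :: r) := popMinA_perm q m r hm
        have hma : m = a := by
          have h1 : a ≤ m := by
            have : m ∈ (a :: b :: rest) := hperm.mem_iff.mp (hqr.mem_iff.mpr (by simp))
            rcases List.mem_cons.mp this with h | h
            · omega
            · exact hab.2 m h
          have h2 : m ≤ a := popMinA_min q m r hm a (hperm.mem_iff.mpr (by simp))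
          omega
        subst hma
        have hr : r.Perm (b :: rest) := (hqr.symm.trans hperm).cons_inv
        have hql : q.length = rest.length + 2 := by rw [hperm.length_eq]; simp
        unfold loopA
        rw [hm]
        simp only []
        by_cases hK : m < K
        · rw [if_pos ⟨hK, by omega⟩]
          cases hm2 : popMinA r with
          | none => exact absurd (popMinA_none r hm2) (by
              intro hq; subst hq; exact absurd hr.symm (by simp))
          | some p2 =>
            obtain ⟨m2, r2⟩ := p2
            have hr2 : r.Perm (m2 :: r2) := popMinA_perm r m2 r2 hm2
            have hm2b : m2 = b := by
              have h1 : b ≤ m2 := by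
                have : m2 ∈ (b :: rest) := hr.mem_iff.mp (hr2.mem_iff.mpr (by simp))
                rcases List.mem_cons.mp this with h | h
                · omega
                · exact (List.pairwise_cons.mp hsort').1 m2 h
              have h2 : m2 ≤ b := popMinA_min r m2 r2 hm2 b (hr.mem_iff.mpr (by simp))
              omega
            subst hm2b
            have hrest : r2.Perm rest := (hr2.symm.trans hr).cons_inv
            rw [refLoop, if_pos hK]
            have hsrest : rest.Pairwise (· ≤ ·) := (List.pairwise_cons.mp hsort').2
            have hlen2 : (r2 ++ [m + m2 * 2]).length = rest.length + 1 := by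
              rw [List.length_append, hrest.length_eq]; simp
            have harith : m + m2 * 2 = m + 2 * m2 := by ring
            refine ih (rest.length + 1) (by omega) _ _ K (ans + 1) hlen2 ?_ (insortB_sorted _ _ hsrest)
            rw [harith]
            refine (List.perm_append_comm.trans ?_).trans (insortB_perm (m + 2 * m2) rest).symm
            exact (hrest.cons _)
        · rw [if_neg (by intro hc; exact hK hc.1), if_neg hK]
          rw [refLoop, if_neg hK]

-- ===== lemmas about B's two queues =====

-- the stable merge of the two queues (o preferred on ties), the pot as one sorted list
def mergeQ : List Int → List Int → List Int
  | [], m => m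
  | o, [] => o
  | x :: o, y :: m => if x ≤ y then x :: mergeQ o (y :: m) else y :: mergeQ (x :: o) m
termination_by o m => o.length + m.length

theorem mergeQ_nil_right : ∀ (o : List Int), mergeQ o [] = o := by
  intro o; cases o <;> simp [mergeQ]

theorem pop_mergeQ (o m : List Int) (h : 1 ≤ o.length + m.length) :
    mergeQ o m = (pyPop o m).1 :: mergeQ (pyPop o m).2.1 (pyPop o m).2.2 := by
  rcases o with _ | ⟨x, o'⟩ <;> rcases m with _ | ⟨y, m'⟩
  · simp at h
  · simp [pyPop, takeO, mergeQ]
  · simp [pyPop, takeO, mergeQ_nil_right]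
  · by_cases hxy : x ≤ y <;> simp [pyPop, takeO, mergeQ, hxy]

theorem pop_mem (o m : List Int) (h : 1 ≤ o.length + m.length) :
    (pyPop o m).1 ∈ o ∨ (pyPop o m).1 ∈ m := by
  rcases o with _ | ⟨x, o'⟩ <;> rcases m with _ | ⟨y, m'⟩
  · simp at h
  · simp [pyPop, takeO]
  · simp [pyPop, takeO]
  · by_cases hxy : x ≤ y <;> simp [pyPop, takeO, hxy]

theorem pop_min (o m : List Int) (hso : o.Pairwise (· ≤ ·)) (hsm : m.Pairwise (· ≤ ·)) :
    ∀ z, (z ∈ (pyPop o m).2.1 ∨ z ∈ (pyPop o m).2.2) → (pyPop o m).1 ≤ z := by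
  rcases o with _ | ⟨x, o'⟩ <;> rcases m with _ | ⟨y, m'⟩
  · simp [pyPop, takeO]
  · intro z hz
    simp [pyPop, takeO] at hz ⊢
    exact (List.pairwise_cons.mp hsm).1 z hz
  · intro z hz
    simp [pyPop, takeO] at hz ⊢
    exact (List.pairwise_cons.mp hso).1 z hz
  · intro z hz
    by_cases hxy : x ≤ y
    · have hpp : pyPop (x :: o') (y :: m') = (x, o', y :: m') := by
        simp [pyPop, takeO, hxy]
      rw [hpp] at hz ⊢
      rcases hz with hz | hz
      · exact (List.pairwise_cons.mp hso).1 z hz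
      · rcases List.mem_cons.mp hz with rfl | hz
        · exact hxy
        · have := (List.pairwise_cons.mp hsm).1 z hz; omega
    · have hpp : pyPop (x :: o') (y :: m') = (y, x :: o', m') := by
        simp [pyPop, takeO, hxy]
      rw [hpp] at hz ⊢
      rcases hz with hz | hz
      · rcases List.mem_cons.mp hz with rfl | hz
        · omega
        · have := (List.pairwise_cons.mp hso).1 z hz; omega
      · exact (List.pairwise_cons.mp hsm).1 z hz

theorem pop_sub (o m : List Int) :
    (∀ z ∈ (pyPop o m).2.1, z ∈ o) ∧ (∀ z ∈ (pyPop o m).2.2, z ∈ m) := by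
  unfold pyPop
  split_ifs
  · exact ⟨fun z hz => List.mem_of_mem_tail hz, fun z hz => hz⟩
  · exact ⟨fun z hz => hz, fun z hz => List.mem_of_mem_tail hz⟩

theorem pop_sorted (o m : List Int) (hso : o.Pairwise (· ≤ ·)) (hsm : m.Pairwise (· ≤ ·)) :
    (pyPop o m).2.1.Pairwise (· ≤ ·) ∧ (pyPop o m).2.2.Pairwise (· ≤ ·) := by
  unfold pyPop
  split_ifs
  · exact ⟨hso.tail, hsm⟩
  · exact ⟨hso, hsm.tail⟩

theorem pop_rel3 (o m : List Int) (hsm : m.Pairwise (fun x y => y ≤ 3 * x)) :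
    (pyPop o m).2.2.Pairwise (fun x y => y ≤ 3 * x) := by
  unfold pyPop
  split_ifs
  · exact hsm
  · exact hsm.tail

-- every surviving mix element is ≤ 3 · the popped value
theorem pop_m_3a (o m : List Int) (h3 : ∀ x ∈ m, ∀ v ∈ o, x ≤ 3 * v)
    (h4 : m.Pairwise (fun x y => y ≤ 3 * x)) :
    ∀ x ∈ (pyPop o m).2.2, x ≤ 3 * (pyPop o m).1 := by
  rcases o with _ | ⟨a, o'⟩ <;> rcases m with _ | ⟨y, m'⟩
  · simp [pyPop, takeO]
  · intro x hx
    simp [pyPop, takeO] at hx ⊢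
    exact (List.pairwise_cons.mp h4).1 x hx
  · simp [pyPop, takeO]
  · intro x hx
    by_cases hxy : a ≤ y <;> simp [pyPop, takeO, hxy] at hx ⊢
    · exact h3 x (by simp [hx]) a (by simp)
    · exact (List.pairwise_cons.mp h4).1 x hx

-- insort into a merge whose mix part is entirely ≤ s = append s to the mix queue
theorem insort_merge (s : Int) : ∀ (n : ℕ) (o m : List Int), o.length + m.length = n →
    (∀ x ∈ m, x ≤ s) → insortB s (mergeQ o m) = mergeQ o (m ++ [s]) := by
  intro n
  induction n using Nat.strong_induction_on with
  | _ n ih =>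
    intro o m hn hm
    match o, m with
    | [], [] => simp [mergeQ, insortB]
    | [], y :: m' =>
      have hy : y ≤ s := hm y (by simp)
      have hih := ih m'.length (by simp at hn; omega) [] m' (by simp) (fun x hx => hm x (by simp [hx]))
      simp only [mergeQ] at hih ⊢
      simp only [insortB, if_pos hy, List.cons_append]
      rw [hih]
    | x :: o', [] =>
      have hih := ih o'.length (by simp at hn; omega) o' [] (by simp) (by simp)
      rw [mergeQ_nil_right, List.nil_append] at hih
      rw [mergeQ_nil_right, List.nil_append]
      by_cases hxs : x ≤ s
      · simp only [insortB, if_pos hxs]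
        rw [hih]
        simp [mergeQ, hxs]
      · simp only [insortB, if_neg hxs]
        simp [mergeQ, hxs, mergeQ_nil_right]
    | x :: o', y :: m' =>
      have hy : y ≤ s := hm y (by simp)
      by_cases hxy : x ≤ y
      · simp only [mergeQ, if_pos hxy, List.cons_append]
        simp only [insortB, if_pos (le_trans hxy hy)]
        rw [ih (o'.length + (m'.length + 1)) (by simp at hn; omega) o' (y :: m') (by simp) hm]
        simp [mergeQ]
      · simp only [mergeQ, if_neg hxy, List.cons_append]
        simp only [insortB, if_pos hy]
        rw [ih (o'.length + 1 + m'.length) (by simp at hn; omega) (x :: o') m' (by simp)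
          (fun z hz => hm z (by simp [hz]))]

-- the main correspondence: the reference loop on the merged pot equals Source B's loop
theorem refLoop_loopB : ∀ (n : ℕ) (o m : List Int) (K ans : Int),
    o.length + m.length = n → 1 ≤ n →
    o.Pairwise (· ≤ ·) → m.Pairwise (· ≤ ·) →
    (∀ x ∈ m, ∀ v ∈ o, x ≤ 3 * v) → m.Pairwise (fun x y => y ≤ 3 * x) →
    refLoop (mergeQ o m) K ans = loopB o m K ans := by
  intro n
  induction n using Nat.strong_induction_on with
  | _ n ih =>
    intro o m K ans hn h1 hso hsm h3 h4
    have hfv : (if takeO o m then o.headD 0 else m.headD 0) = (pyPop o m).1 := by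
      unfold pyPop; split_ifs <;> rfl
    have hl1 := pyPop_len o m (by omega)
    have hp1 := pop_mergeQ o m (by omega)
    rw [loopB, hfv]
    by_cases hone : n = 1
    · -- a single element left: both loops stop
      have hz : (pyPop o m).2.1.length + (pyPop o m).2.2.length = 0 := by omega
      have ho1 : (pyPop o m).2.1 = [] := by
        cases h : (pyPop o m).2.1; rfl; rw [h] at hz; simp at hz
      have hm1 : (pyPop o m).2.2 = [] := by
        cases h : (pyPop o m).2.2; rfl; rw [h] at hz; simp at hz
      rw [ho1, hm1] at hp1
      rw [hp1]
      simp only [mergeQ]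
      rw [if_neg (by omega)]
      rw [refLoop]
    · -- at least two elements: pop twice on both sides
      have h2n : 2 ≤ n := by omega
      have hso1 := (pop_sorted o m hso hsm).1
      have hsm1 := (pop_sorted o m hso hsm).2
      have hl2 := pyPop_len (pyPop o m).2.1 (pyPop o m).2.2 (by omega)
      have hp2 := pop_mergeQ (pyPop o m).2.1 (pyPop o m).2.2 (by omega)
      -- names
      set a := (pyPop o m).1 with ha
      set o1 := (pyPop o m).2.1 with ho1
      set m1 := (pyPop o m).2.2 with hm1
      set b := (pyPop o1 m1).1 with hb
      set o2 := (pyPop o1 m1).2.1 with ho2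
      set m2 := (pyPop o1 m1).2.2 with hm2
      have hab : a ≤ b := by
        rcases pop_mem o1 m1 (by omega) with h | h
        · exact pop_min o m hso hsm b (Or.inl h)
        · exact pop_min o m hso hsm b (Or.inr h)
      have hbmin := pop_min o1 m1 hso1 hsm1
      have hsub1 := pop_sub o m
      have hsub2 := pop_sub o1 m1
      -- every surviving mix element x: b ≤ x ≤ 3a, hence 0 ≤ a and x ≤ a + 2b
      have hx3a : ∀ x ∈ m2, x ≤ 3 * a := fun x hx =>
        pop_m_3a o m h3 h4 x (hsub2.2 x hx)
      have hxb : ∀ x ∈ m2, b ≤ x := fun x hx => hbmin x (Or.inr hx)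
      have hxs : ∀ x ∈ m2, x ≤ a + 2 * b := by
        intro x hx
        have := hx3a x hx; have := hxb x hx; omega
      rw [hp1, hp2, refLoop]
      by_cases hK : a < K
      · rw [if_pos hK, if_pos ⟨hK, by omega⟩]
        rw [insort_merge (a + 2 * b) (o2.length + m2.length) o2 m2 rfl hxs]
        refine ih (n - 1) (by omega) o2 (m2 ++ [a + 2 * b]) K (ans + 1) (by simp; omega) (by omega)
          (pop_sorted o1 m1 hso1 hsm1).1 ?_ ?_ ?_
        · -- m2 ++ [s] sorted
          rw [List.pairwise_append]
          exact ⟨(pop_sorted o1 m1 hso1 hsm1).2, by simp, by simpa using hxs⟩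
        · -- x ≤ 3v for the new mix queue against the remaining originals
          intro x hx v hv
          have hvb : b ≤ v := hbmin v (Or.inl hv)
          rcases List.mem_append.mp hx with hx | hx
          · exact h3 x (hsub1.2 x (hsub2.2 x hx)) v (hsub1.1 v (hsub2.1 v hv))
          · simp at hx; omega
        · -- later mixes ≤ 3 · earlier mixes
          rw [List.pairwise_append]
          refine ⟨pop_rel3 o1 m1 (pop_rel3 o m h4), by simp, ?_⟩
          intro x hx y hy
          simp at hy
          have := hxb x hx
          omega
      · rw [if_neg hK, if_neg (by intro hc; exact hK hc.1), if_neg hK]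

theorem foldl_push : ∀ (l acc : List Int), l.foldl (fun q e => q ++ [e]) acc = acc ++ l := by
  intro l
  induction l with
  | nil => simp
  | cons x xs ih => intro acc; simp [List.foldl_cons, ih]

-- ===== VERDICT (by name: the statement is the Claim_ definition above) =====
theorem solution_spec : Claim_equal_solution := by
  intro scoville K _ hpre
  unfold Spec_solution solution solution_alt
  simp only [foldl_push, List.nil_append]
  have hsorted := PySem.List.sorted_pairwise scoville (fun x => x)
  have hA : loopA scoville K 0 = refLoop (PySem.List.sorted scoville (fun x => x) false) K 0 :=
    loopA_ref scoville.length scoville _ K 0 rfl (PySem.List.sorted_perm _ _ _).symm (by simpa using hsorted)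
  have hlen : 1 ≤ (PySem.List.sorted scoville (fun x => x) false).length := by
    rw [(PySem.List.sorted_perm scoville (fun x => x) false).length_eq]
    cases scoville; exact absurd rfl hpre; simp
  have hB : refLoop (mergeQ (PySem.List.sorted scoville (fun x => x) false) []) K 0
      = loopB (PySem.List.sorted scoville (fun x => x) false) [] K 0 :=
    refLoop_loopB ((PySem.List.sorted scoville (fun x => x) false).length)
      (PySem.List.sorted scoville (fun x => x) false) [] K 0 (by simp) hlen
      (by simpa using hsorted) (by simp) (by simp) (by simp)
  rw [hA, ← hB, mergeQ_nil_right]
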